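-- pv_equiv track=rewrite | github.com/rmari/utils | dict_utils.py | matching
-- ===== SOURCE A (Python) =====
-- def matching(a_dict, substr):
--     """
--         Returns the items of the string-key dictionary `a_dict`
--         which keys matches all the substrings in `substr`.
--     """
--
--     items = []
--     if not isinstance(substr, list):
--         substr = [substr]
--     for k in a_dict:
--         if sum([k.find(s) >= 0 for s in substr]) == len(substr):
--             items.append((k, a_dict[k]))
--     return items
-- ===== SOURCE B (Python) =====
-- def matching(a_dict, substr):
--     """Same result as A via progressive filtering of the key list per substring."""
--     if not isinstance(substr, list):
--         substr = [substr]
--     keys = list(a_dict)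
--     for s in substr:
--         keys = [k for k in keys if s in k]
--     return [(k, a_dict[k]) for k in keys]
-- ===== Notes on version B (the rewrite author's own statement) =====
-- stated objective: faster
-- what changed: Instead of one pass over the dict testing every key against all substrings (building an indicator list and comparing its sum to len(substr)), B progressively filters the list of keys once per substring over a shrinking candidate set and builds the (key, value) pairs at the end.
import Mathlib
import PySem

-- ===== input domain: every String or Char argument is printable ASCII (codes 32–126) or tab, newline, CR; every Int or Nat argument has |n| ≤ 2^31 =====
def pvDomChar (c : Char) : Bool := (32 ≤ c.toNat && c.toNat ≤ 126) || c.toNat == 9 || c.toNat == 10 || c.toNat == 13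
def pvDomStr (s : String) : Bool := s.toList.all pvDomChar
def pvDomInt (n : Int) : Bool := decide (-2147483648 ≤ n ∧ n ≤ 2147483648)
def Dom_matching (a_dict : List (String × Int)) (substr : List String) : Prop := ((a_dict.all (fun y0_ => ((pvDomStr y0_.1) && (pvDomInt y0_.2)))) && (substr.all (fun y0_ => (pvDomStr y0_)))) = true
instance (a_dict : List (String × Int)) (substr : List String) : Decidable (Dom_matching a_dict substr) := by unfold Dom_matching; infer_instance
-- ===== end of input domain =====

-- ===== PORT A =====
-- A: one pass over the dict; a key is kept iff the sum of the indicators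
-- [k.find(s) >= 0 for s in substr] equals len(substr); appends (k, a_dict[k]).
-- (the dict argument is modelled with PySem.Dict.ofList: duplicate keys collapse
-- exactly as Python's dict construction does)
def matching (a_dict : List (String × Int)) (substr : List String) : List (String × Int) :=
  let d := PySem.Dict.ofList a_dict
  d.items.foldl
    (fun items p =>
      if ((substr.map (fun s => if (0 : Int) ≤ PySem.Str.find p.1 s then (1 : Int) else 0)).sum
            = (substr.length : Int))
      then items ++ [(p.1, d.getD p.1 0)] else items) []

-- ===== PORT B =====
-- B: progressive filtering — start from the key list, filter it once per
-- substring ('s in k'), then build the (k, a_dict[k]) pairs from the survivors.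
def matching_alt (a_dict : List (String × Int)) (substr : List String) : List (String × Int) :=
  let d := PySem.Dict.ofList a_dict
  let keys := substr.foldl (fun ks s => ks.filter (fun k => PySem.Str.isIn s k)) d.keys
  keys.map (fun k => (k, d.getD k 0))

-- ===== PRECONDITION & SPEC =====
def Spec_matching (a_dict : List (String × Int)) (substr : List String) (out : List (String × Int)) : Prop := out = matching_alt a_dict substr
instance (a_dict : List (String × Int)) (substr : List String) (out : List (String × Int)) : Decidable (Spec_matching a_dict substr out) := by unfold Spec_matching; infer_instance

-- ===== CLAIM (what is proved, stated in full; the proofs are below) =====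
def Claim_equal_matching : Prop := ∀ (a_dict : List (String × Int)) (substr : List String), Dom_matching a_dict substr → Spec_matching a_dict substr (matching a_dict substr)

-- ===== LEMMAS AND PROOFS =====

-- B's per-substring filter loop is one filter by the conjunction of all tests
theorem foldl_filter_eq_filter_all (substr : List String) (ks : List String) :
    substr.foldl (fun ks s => ks.filter (fun k => PySem.Str.isIn s k)) ks
      = ks.filter (fun k => substr.all (fun s => PySem.Str.isIn s k)) := by
  induction substr generalizing ks with
  | nil => simp
  | cons s t ih =>
      simp only [List.foldl_cons, ih, List.filter_filter, List.all_cons]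
      apply List.filter_congr
      intro k _
      exact Bool.and_comm _ _

-- A's indicator-sum test on a key is B's all-substrings test
theorem sum_ind_eq_all (k : String) (substr : List String) :
    ((substr.map (fun s => if (0 : Int) ≤ PySem.Str.find k s then (1 : Int) else 0)).sum
        = (substr.length : Int))
      ↔ substr.all (fun s => PySem.Str.isIn s k) = true := by
  have hfe : (fun s => if (0 : Int) ≤ PySem.Str.find k s then (1 : Int) else 0)
      = (fun s => if (decide ((0 : Int) ≤ PySem.Str.find k s)) = true then (1 : Int) else 0) := by
    funext s
    simp
  rw [hfe, PySem.List.sum_map_ite_one_zero]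
  constructor
  · intro h
    have hcount : substr.countP (fun s => decide (0 ≤ PySem.Str.find k s)) = substr.length := by
      exact_mod_cast h
    have hall := List.countP_eq_length.mp hcount
    simp only [List.all_eq_true]
    intro s hs
    have h0 : (0 : Int) ≤ PySem.Str.find k s := by simpa using hall s hs
    rw [PySem.Str.isIn_iff_infix]
    exact (PySem.Str.find_nonneg_iff (s := k) (sub := s)).mp h0
  · intro h
    have hcount : substr.countP (fun s => decide (0 ≤ PySem.Str.find k s)) = substr.length := by
      apply List.countP_eq_length.mpr
      intro s hs
      simp only [List.all_eq_true] at h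
      have hin := h s hs
      rw [PySem.Str.isIn_iff_infix] at hin
      simpa using (PySem.Str.find_nonneg_iff (s := k) (sub := s)).mpr hin
    exact_mod_cast hcount

-- the two loop shapes agree over any dict with unique keys
theorem matching_core (d : PySem.Dict String Int) (hnd : d.keys.Nodup) (substr : List String) :
    d.items.foldl
        (fun items p =>
          if ((substr.map (fun s => if (0 : Int) ≤ PySem.Str.find p.1 s then (1 : Int) else 0)).sum
                = (substr.length : Int))
          then items ++ [(p.1, d.getD p.1 0)] else items) []
      = (substr.foldl (fun ks s => ks.filter (fun k => PySem.Str.isIn s k)) d.keys).map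
          (fun k => (k, d.getD k 0)) := by
  rw [PySem.List.foldl_append_ite, foldl_filter_eq_filter_all,
      PySem.Dict.items_eq_map_keys d hnd 0, List.nil_append, List.filter_map, List.map_map]
  congr 1
  apply List.filter_congr
  intro k _
  simp only [Function.comp]
  rw [Bool.eq_iff_iff]
  simp only [decide_eq_true_eq]
  exact sum_ind_eq_all k substr

-- ===== VERDICT (by name: the statement is the Claim_ definition above) =====
theorem matching_spec : Claim_equal_matching := by
  intro a_dict substr _
  unfold Spec_matching matching matching_alt
  exact matching_core (PySem.Dict.ofList a_dict) (PySem.Dict.nodup_keys_ofList a_dict) substr
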